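-- pv_equiv track=rewrite | github.com/Shikher-jain/Novas-Arc | BACK-UP/MultiContext2_0/test/shared_config.py | persona_expansion
-- ===== SOURCE A (Python) =====
-- def persona_expansion(keywords, context=None):
--     personas = []
--     if context == "technical" or "api" in keywords or "developer" in keywords:
--         personas.append("technical expert")
--     if context == "sales" or "pricing" in keywords or "product" in keywords:
--         personas.append("sales assistant")
--     if context == "support" or "customer" in keywords or "support" in keywords:
--         personas.append("customer support agent")
--     if context == "booking" or "schedule" in keywords or "booking" in keywords:
--         personas.append("booking assistant")
--     if "educate" in keywords or "teach" in keywords or context == "education":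
--         personas.append("educator")
--     if "troubleshoot" in keywords or "error" in keywords or "issue" in keywords:
--         personas.append("troubleshooter")
--     if "concierge" in keywords or context == "travel":
--         personas.append("concierge")
--     if "legal" in keywords or context == "legal":
--         personas.append("legal advisor")
--     if "hospitality" in keywords or context == "hospitality":
--         personas.append("hospitality expert")
--     if "retail" in keywords or context == "retail":
--         personas.append("retail assistant")
--     if "government" in keywords or context == "government":
--         personas.append("government official")
--     general_keywords = {"company", "service", "product", "furniture", "appliances", "electronics", "rental", "rent", "mojo", "about", "feature", "benefit"}
--     if any(gk in keywords for gk in general_keywords):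
--         for extra in ["customer support agent", "sales assistant", "product expert"]:
--             if extra not in personas:
--                 personas.append(extra)
--     if not personas:
--         personas.append("helpful assistant")
--     return personas
-- ===== SOURCE B (Python) =====
-- _KEYWORD_PERSONA = {
--     "api": "technical expert", "developer": "technical expert",
--     "pricing": "sales assistant", "product": "sales assistant",
--     "customer": "customer support agent", "support": "customer support agent",
--     "schedule": "booking assistant", "booking": "booking assistant",
--     "educate": "educator", "teach": "educator",
--     "troubleshoot": "troubleshooter", "error": "troubleshooter", "issue": "troubleshooter",
--     "concierge": "concierge",
--     "legal": "legal advisor",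
--     "hospitality": "hospitality expert",
--     "retail": "retail assistant",
--     "government": "government official",
-- }
-- _CONTEXT_PERSONA = {
--     "technical": "technical expert", "sales": "sales assistant",
--     "support": "customer support agent", "booking": "booking assistant",
--     "education": "educator", "travel": "concierge", "legal": "legal advisor",
--     "hospitality": "hospitality expert", "retail": "retail assistant",
--     "government": "government official",
-- }
-- _ORDER = ["technical expert", "sales assistant", "customer support agent",
--           "booking assistant", "educator", "troubleshooter", "concierge",
--           "legal advisor", "hospitality expert", "retail assistant",
--           "government official"]
-- _GENERAL = {"company", "service", "product", "furniture", "appliances",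
--             "electronics", "rental", "rent", "mojo", "about", "feature", "benefit"}
--
--
-- def persona_expansion(keywords, context=None):
--     # Inverted index: one pass over the keywords collects the set of triggered
--     # personas; the output is then emitted in the fixed priority order.
--     hit = set()
--     if context in _CONTEXT_PERSONA:
--         hit.add(_CONTEXT_PERSONA[context])
--     for k in keywords:
--         p = _KEYWORD_PERSONA.get(k)
--         if p is not None:
--             hit.add(p)
--     personas = [p for p in _ORDER if p in hit]
--     if not _GENERAL.isdisjoint(keywords):
--         for extra in ("customer support agent", "sales assistant", "product expert"):
--             if extra not in hit:
--                 personas.append(extra)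
--     return personas or ["helpful assistant"]
-- ===== Notes on version B (the rewrite author's own statement) =====
-- stated objective: alternative
-- what changed: Instead of eleven sequential if-branches each scanning the keyword list, B builds an inverted keyword->persona index, collects the set of triggered personas in one pass over the keywords (plus one context lookup), and emits them in the fixed priority order; the general-keywords block tests membership in the hit set and the fallback becomes 'personas or [...]'.
import Mathlib
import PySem

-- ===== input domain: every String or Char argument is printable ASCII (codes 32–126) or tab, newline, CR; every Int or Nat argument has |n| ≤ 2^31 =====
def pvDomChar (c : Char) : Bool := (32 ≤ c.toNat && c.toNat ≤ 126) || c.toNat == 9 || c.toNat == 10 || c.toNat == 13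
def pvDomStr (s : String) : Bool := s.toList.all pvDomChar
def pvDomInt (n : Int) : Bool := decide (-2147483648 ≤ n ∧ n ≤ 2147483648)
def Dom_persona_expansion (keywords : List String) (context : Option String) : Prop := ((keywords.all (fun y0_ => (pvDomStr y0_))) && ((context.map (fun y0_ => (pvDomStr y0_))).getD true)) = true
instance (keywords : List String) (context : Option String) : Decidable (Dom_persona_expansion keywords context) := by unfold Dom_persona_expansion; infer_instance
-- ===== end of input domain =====

-- B inverts A's eleven keyword scans into an inverted index: one pass over the keywords
-- collects the set of triggered personas, which are then emitted in the fixed priority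
-- order (objective: alternative; same asymptotic cost).

-- ===== PORT A =====
def persona_expansion (keywords : List String) (context : Option String) : List String :=
  let personas : List String := []
  let personas := if context == some "technical" || keywords.contains "api" || keywords.contains "developer" then personas ++ ["technical expert"] else personas
  let personas := if context == some "sales" || keywords.contains "pricing" || keywords.contains "product" then personas ++ ["sales assistant"] else personas
  let personas := if context == some "support" || keywords.contains "customer" || keywords.contains "support" then personas ++ ["customer support agent"] else personas
  let personas := if context == some "booking" || keywords.contains "schedule" || keywords.contains "booking" then personas ++ ["booking assistant"] else personas
  let personas := if keywords.contains "educate" || keywords.contains "teach" || context == some "education" then personas ++ ["educator"] else personas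
  let personas := if keywords.contains "troubleshoot" || keywords.contains "error" || keywords.contains "issue" then personas ++ ["troubleshooter"] else personas
  let personas := if keywords.contains "concierge" || context == some "travel" then personas ++ ["concierge"] else personas
  let personas := if keywords.contains "legal" || context == some "legal" then personas ++ ["legal advisor"] else personas
  let personas := if keywords.contains "hospitality" || context == some "hospitality" then personas ++ ["hospitality expert"] else personas
  let personas := if keywords.contains "retail" || context == some "retail" then personas ++ ["retail assistant"] else personas
  let personas := if keywords.contains "government" || context == some "government" then personas ++ ["government official"] else personas
  let general_keywords : PySem.Set String := PySem.Set.ofList ["company", "service", "product", "furniture", "appliances", "electronics", "rental", "rent", "mojo", "about", "feature", "benefit"]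
  let personas := if general_keywords.any (fun gk => keywords.contains gk) then
      ["customer support agent", "sales assistant", "product expert"].foldl
        (fun ps extra => if ps.contains extra then ps else ps ++ [extra]) personas
    else personas
  if personas == [] then personas ++ ["helpful assistant"] else personas

-- ===== PORT B =====
-- Source B's module-level dict _KEYWORD_PERSONA; its only use is `.get(k)`, which for a
-- literal dict with distinct keys is exactly this first-match lookup chain (exact).
def pvKw2P (k : String) : Option String :=
  if k == "api" then some "technical expert" else
  if k == "developer" then some "technical expert" else
  if k == "pricing" then some "sales assistant" else
  if k == "product" then some "sales assistant" else
  if k == "customer" then some "customer support agent" else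
  if k == "support" then some "customer support agent" else
  if k == "schedule" then some "booking assistant" else
  if k == "booking" then some "booking assistant" else
  if k == "educate" then some "educator" else
  if k == "teach" then some "educator" else
  if k == "troubleshoot" then some "troubleshooter" else
  if k == "error" then some "troubleshooter" else
  if k == "issue" then some "troubleshooter" else
  if k == "concierge" then some "concierge" else
  if k == "legal" then some "legal advisor" else
  if k == "hospitality" then some "hospitality expert" else
  if k == "retail" then some "retail assistant" else
  if k == "government" then some "government official" else
  none

-- Source B's module-level dict _CONTEXT_PERSONA; used only via `in` + `[...]`, i.e. exactly
-- this lookup chain (exact).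
def pvCtx2P (k : String) : Option String :=
  if k == "technical" then some "technical expert" else
  if k == "sales" then some "sales assistant" else
  if k == "support" then some "customer support agent" else
  if k == "booking" then some "booking assistant" else
  if k == "education" then some "educator" else
  if k == "travel" then some "concierge" else
  if k == "legal" then some "legal advisor" else
  if k == "hospitality" then some "hospitality expert" else
  if k == "retail" then some "retail assistant" else
  if k == "government" then some "government official" else
  none

def pvOrder : List String :=
  ["technical expert", "sales assistant", "customer support agent",
   "booking assistant", "educator", "troubleshooter", "concierge",
   "legal advisor", "hospitality expert", "retail assistant",
   "government official"]

def pvGeneralSet : PySem.Set String :=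
  PySem.Set.ofList ["company", "service", "product", "furniture", "appliances",
                    "electronics", "rental", "rent", "mojo", "about", "feature", "benefit"]

def persona_expansion_alt (keywords : List String) (context : Option String) : List String :=
  let hit : PySem.Set String := PySem.Set.empty
  -- if context in _CONTEXT_PERSONA: hit.add(_CONTEXT_PERSONA[context])
  let hit := match context with
    | some c => match pvCtx2P c with
        | some p => PySem.Set.add hit p
        | none => hit
    | none => hit
  -- for k in keywords: p = _KEYWORD_PERSONA.get(k); if p is not None: hit.add(p)
  let hit := keywords.foldl (fun s k =>
      match pvKw2P k with
      | some p => PySem.Set.add s p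
      | none => s) hit
  let personas := pvOrder.filter (fun p => hit.contains p)
  let personas := if !(PySem.Set.isdisjoint pvGeneralSet keywords) then
      ["customer support agent", "sales assistant", "product expert"].foldl
        (fun ps extra => if hit.contains extra then ps else ps ++ [extra]) personas
    else personas
  if personas.isEmpty then ["helpful assistant"] else personas

-- ===== PRECONDITION & SPEC =====
def Spec_persona_expansion (keywords : List String) (context : Option String) (out : List String) : Prop := out = persona_expansion_alt keywords context
instance (keywords : List String) (context : Option String) (out : List String) : Decidable (Spec_persona_expansion keywords context out) := by unfold Spec_persona_expansion; infer_instance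

-- ===== CLAIM (what is proved, stated in full; the proofs are below) =====
def Claim_equal_persona_expansion : Prop := ∀ (keywords : List String) (context : Option String), Dom_persona_expansion keywords context → Spec_persona_expansion keywords context (persona_expansion keywords context)

-- ===== LEMMAS AND PROOFS =====

-- Bool-level membership in a Set after one add
theorem pv_beq_comm (a b : String) : (a == b) = (b == a) := by
  by_cases h : a = b
  · subst h; rfl
  · simp [h, Ne.symm h]

-- Bool-level membership in a Set after one add
theorem pv_contains_add (s : PySem.Set String) (q e : String) :
    List.contains (PySem.Set.add s q) e = (List.contains s e || e == q) := by
  by_cases he : e = q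
  · subst he
    simp only [PySem.Set.add, PySem.Set.contains]
    by_cases hq : List.contains s e
    · rw [if_pos hq, beq_self_eq_true, Bool.or_true, hq]
    · rw [if_neg hq]
      simp [List.contains_append]
  · have hne : (e == q) = false := by simp [he]
    simp only [PySem.Set.add, PySem.Set.contains]
    by_cases hq : List.contains s q
    · rw [if_pos hq, hne, Bool.or_false]
    · rw [if_neg hq]
      simp only [List.contains_append, List.contains_cons, List.contains_nil, hne, Bool.or_false]

-- membership in B's hit set after the keyword pass, in terms of the initial set
theorem pv_hit (keywords : List String) (init : PySem.Set String) (p : String) :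
    List.contains (keywords.foldl (fun s k =>
        match pvKw2P k with
        | some q => PySem.Set.add s q
        | none => s) init) p
      = (List.contains init p || keywords.any (fun k => pvKw2P k == some p)) := by
  induction keywords generalizing init with
  | nil => simp
  | cons k ks ih =>
    simp only [List.foldl_cons, List.any_cons, ih]
    cases h : pvKw2P k with
    | none => simp [h]
    | some q =>
      simp only [h]
      simp only [pv_contains_add, Bool.or_assoc]
      have hb : ((some q : Option String) == some p) = (q == p) := rfl
      rw [hb, pv_beq_comm q p]

theorem pv_any_or (l : List String) (p q : String → Bool) :
    (l.any fun x => p x || q x) = (l.any p || l.any q) := by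
  induction l with
  | nil => rfl
  | cons x xs ih => simp [ih, Bool.or_assoc, Bool.or_comm, Bool.or_left_comm]

theorem pv_any_eq (l : List String) (a : String) :
    (l.any fun x => x == a) = l.contains a := by
  induction l with
  | nil => rfl
  | cons x xs ih =>
    by_cases h : x = a
    · simp [h, ih]
    · simp [h, Ne.symm h, ih]

-- pointwise readings of the two lookup chains, one conjunct per persona
set_option maxHeartbeats 1000000 in
theorem pvK_all (k : String) :
    (pvKw2P k == some "technical expert") = (k == "api" || k == "developer")
    ∧ (pvKw2P k == some "sales assistant") = (k == "pricing" || k == "product")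
    ∧ (pvKw2P k == some "customer support agent") = (k == "customer" || k == "support")
    ∧ (pvKw2P k == some "booking assistant") = (k == "schedule" || k == "booking")
    ∧ (pvKw2P k == some "educator") = (k == "educate" || k == "teach")
    ∧ (pvKw2P k == some "troubleshooter") = (k == "troubleshoot" || k == "error" || k == "issue")
    ∧ (pvKw2P k == some "concierge") = (k == "concierge")
    ∧ (pvKw2P k == some "legal advisor") = (k == "legal")
    ∧ (pvKw2P k == some "hospitality expert") = (k == "hospitality")
    ∧ (pvKw2P k == some "retail assistant") = (k == "retail")
    ∧ (pvKw2P k == some "government official") = (k == "government")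
    ∧ (pvKw2P k == some "product expert") = (false) := by
  by_cases h0 : k = "api"
  · subst h0; decide
  · 
    by_cases h1 : k = "developer"
    · subst h1; decide
    · 
      by_cases h2 : k = "pricing"
      · subst h2; decide
      · 
        by_cases h3 : k = "product"
        · subst h3; decide
        · 
          by_cases h4 : k = "customer"
          · subst h4; decide
          · 
            by_cases h5 : k = "support"
            · subst h5; decide
            · 
              by_cases h6 : k = "schedule"
              · subst h6; decide
              · 
                by_cases h7 : k = "booking"
                · subst h7; decide
                · 
                  by_cases h8 : k = "educate"
                  · subst h8; decide
                  · 
                    by_cases h9 : k = "teach"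
                    · subst h9; decide
                    · 
                      by_cases h10 : k = "troubleshoot"
                      · subst h10; decide
                      · 
                        by_cases h11 : k = "error"
                        · subst h11; decide
                        · 
                          by_cases h12 : k = "issue"
                          · subst h12; decide
                          · 
                            by_cases h13 : k = "concierge"
                            · subst h13; decide
                            · 
                              by_cases h14 : k = "legal"
                              · subst h14; decide
                              · 
                                by_cases h15 : k = "hospitality"
                                · subst h15; decide
                                · 
                                  by_cases h16 : k = "retail"
                                  · subst h16; decide
                                  · 
                                    by_cases h17 : k = "government"
                                    · subst h17; decide
                                    · simp [pvKw2P, h0, h1, h2, h3, h4, h5, h6, h7, h8, h9, h10, h11, h12, h13, h14, h15, h16, h17]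

set_option maxHeartbeats 1000000 in
theorem pvC_all (c : String) :
    (pvCtx2P c == some "technical expert") = (c == "technical")
    ∧ (pvCtx2P c == some "sales assistant") = (c == "sales")
    ∧ (pvCtx2P c == some "customer support agent") = (c == "support")
    ∧ (pvCtx2P c == some "booking assistant") = (c == "booking")
    ∧ (pvCtx2P c == some "educator") = (c == "education")
    ∧ (pvCtx2P c == some "troubleshooter") = (false)
    ∧ (pvCtx2P c == some "concierge") = (c == "travel")
    ∧ (pvCtx2P c == some "legal advisor") = (c == "legal")
    ∧ (pvCtx2P c == some "hospitality expert") = (c == "hospitality")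
    ∧ (pvCtx2P c == some "retail assistant") = (c == "retail")
    ∧ (pvCtx2P c == some "government official") = (c == "government")
    ∧ (pvCtx2P c == some "product expert") = (false) := by
  by_cases h0 : c = "technical"
  · subst h0; decide
  · 
    by_cases h1 : c = "sales"
    · subst h1; decide
    · 
      by_cases h2 : c = "support"
      · subst h2; decide
      · 
        by_cases h3 : c = "booking"
        · subst h3; decide
        · 
          by_cases h4 : c = "education"
          · subst h4; decide
          · 
            by_cases h5 : c = "travel"
            · subst h5; decide
            · 
              by_cases h6 : c = "legal"
              · subst h6; decide
              · 
                by_cases h7 : c = "hospitality"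
                · subst h7; decide
                · 
                  by_cases h8 : c = "retail"
                  · subst h8; decide
                  · 
                    by_cases h9 : c = "government"
                    · subst h9; decide
                    · simp [pvCtx2P, h0, h1, h2, h3, h4, h5, h6, h7, h8, h9]

theorem pvK_te (k : String) : (pvKw2P k == some "technical expert") = (k == "api" || k == "developer") := (pvK_all k).1
theorem pvK_sa (k : String) : (pvKw2P k == some "sales assistant") = (k == "pricing" || k == "product") := (pvK_all k).2.1
theorem pvK_cs (k : String) : (pvKw2P k == some "customer support agent") = (k == "customer" || k == "support") := (pvK_all k).2.2.1
theorem pvK_ba (k : String) : (pvKw2P k == some "booking assistant") = (k == "schedule" || k == "booking") := (pvK_all k).2.2.2.1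
theorem pvK_ed (k : String) : (pvKw2P k == some "educator") = (k == "educate" || k == "teach") := (pvK_all k).2.2.2.2.1
theorem pvK_ts (k : String) : (pvKw2P k == some "troubleshooter") = (k == "troubleshoot" || k == "error" || k == "issue") := (pvK_all k).2.2.2.2.2.1
theorem pvK_co (k : String) : (pvKw2P k == some "concierge") = (k == "concierge") := (pvK_all k).2.2.2.2.2.2.1
theorem pvK_la (k : String) : (pvKw2P k == some "legal advisor") = (k == "legal") := (pvK_all k).2.2.2.2.2.2.2.1
theorem pvK_he (k : String) : (pvKw2P k == some "hospitality expert") = (k == "hospitality") := (pvK_all k).2.2.2.2.2.2.2.2.1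
theorem pvK_ra (k : String) : (pvKw2P k == some "retail assistant") = (k == "retail") := (pvK_all k).2.2.2.2.2.2.2.2.2.1
theorem pvK_go (k : String) : (pvKw2P k == some "government official") = (k == "government") := (pvK_all k).2.2.2.2.2.2.2.2.2.2.1
theorem pvK_pe (k : String) : (pvKw2P k == some "product expert") = (false) := (pvK_all k).2.2.2.2.2.2.2.2.2.2.2
theorem pvC_te (c : String) : (pvCtx2P c == some "technical expert") = (c == "technical") := (pvC_all c).1
theorem pvC_sa (c : String) : (pvCtx2P c == some "sales assistant") = (c == "sales") := (pvC_all c).2.1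
theorem pvC_cs (c : String) : (pvCtx2P c == some "customer support agent") = (c == "support") := (pvC_all c).2.2.1
theorem pvC_ba (c : String) : (pvCtx2P c == some "booking assistant") = (c == "booking") := (pvC_all c).2.2.2.1
theorem pvC_ed (c : String) : (pvCtx2P c == some "educator") = (c == "education") := (pvC_all c).2.2.2.2.1
theorem pvC_ts (c : String) : (pvCtx2P c == some "troubleshooter") = (false) := (pvC_all c).2.2.2.2.2.1
theorem pvC_co (c : String) : (pvCtx2P c == some "concierge") = (c == "travel") := (pvC_all c).2.2.2.2.2.2.1
theorem pvC_la (c : String) : (pvCtx2P c == some "legal advisor") = (c == "legal") := (pvC_all c).2.2.2.2.2.2.2.1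
theorem pvC_he (c : String) : (pvCtx2P c == some "hospitality expert") = (c == "hospitality") := (pvC_all c).2.2.2.2.2.2.2.2.1
theorem pvC_ra (c : String) : (pvCtx2P c == some "retail assistant") = (c == "retail") := (pvC_all c).2.2.2.2.2.2.2.2.2.1
theorem pvC_go (c : String) : (pvCtx2P c == some "government official") = (c == "government") := (pvC_all c).2.2.2.2.2.2.2.2.2.2.1
theorem pvC_pe (c : String) : (pvCtx2P c == some "product expert") = (false) := (pvC_all c).2.2.2.2.2.2.2.2.2.2.2

-- the context lookup's contribution to the hit set
theorem pv_ctxhit (c : String) (p : String) :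
    List.contains (match pvCtx2P c with
      | some q => PySem.Set.add (PySem.Set.empty : PySem.Set String) q
      | none => (PySem.Set.empty : PySem.Set String)) p
      = (pvCtx2P c == some p) := by
  cases h : pvCtx2P c with
  | none => rfl
  | some q =>
    have hred : List.contains (match (some q : Option String) with
        | some q => PySem.Set.add (PySem.Set.empty : PySem.Set String) q
        | none => (PySem.Set.empty : PySem.Set String)) p = List.contains [q] p := rfl
    rw [hred]
    simp only [List.contains_cons, List.contains_nil, Bool.or_false,
      show ((some q : Option String) == some p) = (q == p) from rfl, pv_beq_comm q p]

-- shape normalisers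
theorem pv_ite_app (c : Bool) (acc : List String) (p : String) :
    (if c then acc ++ [p] else acc) = acc ++ (if c then [p] else []) := by
  cases c <;> simp
theorem pv_filter_cons (f : String → Bool) (x : String) (xs : List String) :
    List.filter f (x :: xs) = (if f x then [x] else []) ++ List.filter f xs := by
  by_cases h : f x <;> simp [h]
theorem pv_set_contains (l : List String) (x : String) : PySem.Set.contains l x = l.contains x := rfl
theorem pv_any_false (l : List String) : (l.any fun _ => false) = false := by simp
theorem pv_contains_empty (p : String) : List.contains (PySem.Set.empty : PySem.Set String) p = false := rfl
theorem pv_none_beq (x : String) : ((none : Option String) == some x) = false := rfl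
theorem pv_some_beq (c x : String) : ((some c : Option String) == some x) = (c == x) := rfl
theorem pv_contains_ite (c : Bool) (p e : String) :
    (if c then [p] else []).contains e = (c && (e == p)) := by
  cases c
  · simp
  · rw [if_pos rfl]
    simp only [Bool.true_and, List.contains_cons, List.contains_nil, Bool.or_false]
theorem pv_skip_ite (c : Bool) (ps : List String) (e : String) :
    (if c then ps else ps ++ [e]) = ps ++ (if c then [] else [e]) := by
  cases c <;> simp
theorem pv_contains_ite2 (c : Bool) (p e : String) :
    (if c then ([] : List String) else [p]).contains e = (!c && (e == p)) := by
  cases c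
  · rw [if_neg Bool.false_ne_true]
    simp only [Bool.not_false, Bool.true_and, List.contains_cons, List.contains_nil, Bool.or_false]
  · simp
theorem pv_last' (qs : List String) (h : String) :
    (if qs.isEmpty then [h] else qs) = (if qs == [] then qs ++ [h] else qs) := by
  cases qs <;> simp

-- ===== VERDICT (by name: the statement is the Claim_ definition above) =====
set_option maxHeartbeats 4000000 in
theorem persona_expansion_spec : Claim_equal_persona_expansion := by
  intro keywords context _
  unfold Spec_persona_expansion persona_expansion persona_expansion_alt pvOrder
  rw [show (PySem.Set.ofList ["company", "service", "product", "furniture", "appliances", "electronics", "rental", "rent", "mojo", "about", "feature", "benefit"] : PySem.Set String) = ["company", "service", "product", "furniture", "appliances", "electronics", "rental", "rent", "mojo", "about", "feature", "benefit"] from by decide,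
      show (pvGeneralSet : PySem.Set String) = ["company", "service", "product", "furniture", "appliances", "electronics", "rental", "rent", "mojo", "about", "feature", "benefit"] from by decide]
  cases context with
  | none =>
    simp only [pv_hit, pv_ctxhit, pvK_te, pvK_sa, pvK_cs, pvK_ba, pvK_ed, pvK_ts, pvK_co, pvK_la, pvK_he, pvK_ra, pvK_go, pvK_pe, pvC_te, pvC_sa, pvC_cs, pvC_ba, pvC_ed, pvC_ts, pvC_co, pvC_la, pvC_he, pvC_ra, pvC_go, pvC_pe, pv_any_or, pv_any_eq,
      PySem.Set.isdisjoint, pv_set_contains, pv_any_false, pv_contains_empty,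
      List.contains_nil, pv_filter_cons, List.filter_nil, List.contains_append,
      List.foldl_cons, List.foldl_nil,
      pv_none_beq, pv_some_beq, pv_ite_app, pv_contains_ite, pv_skip_ite, pv_contains_ite2, ite_self, String.reduceBEq, beq_self_eq_true, pv_last',
      List.nil_append, List.append_nil,
      Bool.not_not, Bool.or_false, Bool.false_or, Bool.and_true, Bool.and_false, Bool.false_and, Bool.true_and, Bool.or_assoc]
    all_goals simp only [List.append_assoc, List.nil_append, List.append_nil]
    all_goals simp only [Bool.or_assoc, Bool.or_comm, Bool.or_left_comm]
  | some c =>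
    simp only [pv_hit, pv_ctxhit, pvK_te, pvK_sa, pvK_cs, pvK_ba, pvK_ed, pvK_ts, pvK_co, pvK_la, pvK_he, pvK_ra, pvK_go, pvK_pe, pvC_te, pvC_sa, pvC_cs, pvC_ba, pvC_ed, pvC_ts, pvC_co, pvC_la, pvC_he, pvC_ra, pvC_go, pvC_pe, pv_any_or, pv_any_eq,
      PySem.Set.isdisjoint, pv_set_contains, pv_any_false, pv_contains_empty,
      List.contains_nil, pv_filter_cons, List.filter_nil, List.contains_append,
      List.foldl_cons, List.foldl_nil,
      pv_none_beq, pv_some_beq, pv_ite_app, pv_contains_ite, pv_skip_ite, pv_contains_ite2, ite_self, String.reduceBEq, beq_self_eq_true, pv_last',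
      List.nil_append, List.append_nil,
      Bool.not_not, Bool.or_false, Bool.false_or, Bool.and_true, Bool.and_false, Bool.false_and, Bool.true_and, Bool.or_assoc]
    all_goals simp only [List.append_assoc, List.nil_append, List.append_nil]
    all_goals simp only [Bool.or_assoc, Bool.or_comm, Bool.or_left_comm]
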